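-- pv_equiv track=rewrite | github.com/Jlestat/codewars | English beggars.py | beggars
-- ===== SOURCE A (Python) =====
-- def beggars(values: list, n: int) -> list:
--     fin_list = []
--     for i in range(n):
--         ind = list(range(i,len(values), n))
--         curr_sum = 0
--         for j in ind:
--             curr_sum += values[j]
--         fin_list.append(curr_sum)
--     return fin_list
-- ===== SOURCE B (Python) =====
-- def beggars(values: list, n: int) -> list:
--     res = [0] * n
--     if n > 0:
--         for idx, v in enumerate(values):
--             res[idx % n] += v
--     return res
-- ===== Notes on version B (the rewrite author's own statement) =====
-- stated objective: faster
-- what changed: Replaces A's n strided scans (re-indexing values for each bucket via range(i, len, n)) with a single in-order pass over values that routes each element to bucket idx % n in a preallocated [0]*n.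
import Mathlib
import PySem

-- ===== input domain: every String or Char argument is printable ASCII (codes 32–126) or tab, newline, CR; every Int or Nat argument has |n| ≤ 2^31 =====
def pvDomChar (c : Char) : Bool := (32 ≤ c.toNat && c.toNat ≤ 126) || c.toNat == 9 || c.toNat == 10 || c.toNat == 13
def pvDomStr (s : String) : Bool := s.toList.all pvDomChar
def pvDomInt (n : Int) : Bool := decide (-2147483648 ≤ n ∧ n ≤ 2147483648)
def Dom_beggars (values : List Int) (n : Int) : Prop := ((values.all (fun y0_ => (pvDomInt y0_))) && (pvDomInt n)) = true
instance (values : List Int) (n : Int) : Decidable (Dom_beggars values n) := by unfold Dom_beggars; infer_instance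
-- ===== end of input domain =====

-- B replaces A's n strided scans over values with one in-order pass routing each element to bucket idx % n (measured constant-factor speedup).

-- ===== PORT A =====
-- values[j] is always in range here (j ∈ range(i, len(values), n)), so pyGetD's default 0 is never used.
def beggars (values : List Int) (n : Int) : List Int :=
  (PySem.List.pyRange 0 n 1).foldl (fun finList i =>
    let ind := PySem.List.pyRange i (values.length : Int) n
    let currSum := ind.foldl (fun acc j => acc + PySem.List.pyGetD values j 0) 0
    finList ++ [currSum]) []

-- ===== PORT B =====
-- res[idx % n] is always in range (0 ≤ idx % n < n = res.length), so getD's default 0 is never used.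
def beggars_alt (values : List Int) (n : Int) : List Int :=
  let res := List.replicate n.toNat 0
  if 0 < n then
    (PySem.List.enumerate values).foldl (fun r p =>
      r.set (PySem.Int.mod p.1 n).toNat (r.getD (PySem.Int.mod p.1 n).toNat 0 + p.2)) res
  else res

-- ===== PRECONDITION & SPEC =====
def Spec_beggars (values : List Int) (n : Int) (out : List Int) : Prop := out = beggars_alt values n
instance (values : List Int) (n : Int) (out : List Int) : Decidable (Spec_beggars values n out) := by unfold Spec_beggars; infer_instance

-- ===== CLAIM (what is proved, stated in full; the proofs are below) =====
def Claim_equal_beggars : Prop := ∀ (values : List Int) (n : Int), Dom_beggars values n → Spec_beggars values n (beggars values n)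

-- ===== LEMMAS AND PROOFS =====

-- A's bucket-i inner sum (the body of A's outer loop).
def innerSum (values : List Int) (n i : Int) : Int :=
  (PySem.List.pyRange i (values.length : Int) n).foldl (fun acc j => acc + PySem.List.pyGetD values j 0) 0

-- Extending the stop of a positive-step range by one appends the new stop value exactly when the stride hits it.
lemma pyRange_succ_stop (i L n : Int) (hn : 0 < n) (_hi : 0 ≤ i) :
    PySem.List.pyRange i (L + 1) n =
      PySem.List.pyRange i L n ++ (if i ≤ L ∧ n ∣ (L - i) then [L] else []) := by
  rw [PySem.List.pyRange_of_pos _ _ hn, PySem.List.pyRange_of_pos _ _ hn]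
  by_cases hcond : i ≤ L ∧ n ∣ (L - i)
  · obtain ⟨hile, k, hk⟩ := hcond
    have hnk : 0 ≤ n * k := by omega
    have hk0 : 0 ≤ k := nonneg_of_mul_nonneg_right hnk hn
    have hc1 : (L + 1 - i + n - 1) / n = k + 1 := by
      have h : L + 1 - i + n - 1 = 0 + (k + 1) * n := by linear_combination hk
      rw [h, Int.add_mul_ediv_right _ _ (by omega)]
      simp
    rw [if_pos (show i < L + 1 by omega), hc1,
      if_pos (show i ≤ L ∧ n ∣ (L - i) from ⟨hile, ⟨k, hk⟩⟩)]
    by_cases hlt : i < L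
    · have hc0 : (L - i + n - 1) / n = k := by
        have h : L - i + n - 1 = (n - 1) + k * n := by linear_combination hk
        rw [h, Int.add_mul_ediv_right _ _ (by omega),
          Int.ediv_eq_zero_of_lt (by omega) (by omega)]
        omega
      rw [if_pos hlt, hc0, show (k + 1).toNat = k.toNat + 1 by omega,
        List.range_succ, List.map_append]
      simp only [List.map_cons, List.map_nil, List.append_cancel_left_eq,
        List.cons.injEq, and_true]
      rw [show ((k.toNat : Int)) = k by omega]
      omega
    · have hiL : i = L := by omega
      have hk00 : k = 0 := by
        rcases lt_or_ge k 0 with h | h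
        · omega
        · rcases lt_or_ge 0 k with h2 | h2
          · nlinarith
          · omega
      rw [if_neg hlt]
      simp [hk00, hiL]
  · rw [if_neg hcond, List.append_nil]
    rcases lt_or_ge L i with h | h
    · rw [if_neg (by omega), if_neg (by omega)]
    · have hndvd : ¬ n ∣ (L - i) := fun hd => hcond ⟨h, hd⟩
      have hq := Int.mul_ediv_add_emod (L - i) n
      have hr0 : 0 ≤ (L - i) % n := Int.emod_nonneg _ (by omega)
      have hrn : (L - i) % n < n := Int.emod_lt_of_pos _ hn
      have hr1 : 1 ≤ (L - i) % n := by
        rcases lt_or_ge 0 ((L - i) % n) with h2 | h2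
        · omega
        · exact absurd ((PySem.Int.emod_eq_zero_iff_dvd _ _).1 (by omega)) hndvd
      have hc1 : (L + 1 - i + n - 1) / n = (L - i) / n + 1 := by
        have heq : L + 1 - i + n - 1 = ((L - i) % n) + ((L - i) / n + 1) * n := by
          linear_combination -hq
        rw [heq, Int.add_mul_ediv_right _ _ (by omega),
          Int.ediv_eq_zero_of_lt (by omega) (by omega)]
        omega
      have hc0 : (L - i + n - 1) / n = (L - i) / n + 1 := by
        have heq : L - i + n - 1 = ((L - i) % n - 1) + ((L - i) / n + 1) * n := by
          linear_combination -hq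
        rw [heq, Int.add_mul_ediv_right _ _ (by omega),
          Int.ediv_eq_zero_of_lt (by omega) (by omega)]
        omega
      have hiL : i < L := by
        rcases eq_or_lt_of_le h with he | hlt
        · rw [← he] at hr1; simp at hr1
        · exact hlt
      rw [if_pos (by omega), if_pos hiL, hc1, hc0]

lemma innerSum_nil (n i : Int) (hn : 0 < n) (_hi : 0 ≤ i) : innerSum [] n i = 0 := by
  unfold innerSum
  rw [PySem.List.pyRange_of_pos _ _ hn]
  simp only [List.length_nil, Nat.cast_zero]
  rw [if_neg (show ¬ i < (0 : Int) by omega)]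
  simp

-- With 0 ≤ i < n and 0 ≤ L: the stride from i hits L exactly when i = L % n.
lemma hit_iff (i L n : Int) (hn : 0 < n) (hi0 : 0 ≤ i) (hin : i < n) (hL0 : 0 ≤ L) :
    (i ≤ L ∧ n ∣ (L - i)) ↔ i = PySem.Int.mod L n := by
  rw [PySem.Int.mod_eq_emod_of_pos hn]
  have hii : i % n = i := Int.emod_eq_of_lt hi0 hin
  constructor
  · rintro ⟨_, hd⟩
    have h1 : L % n = i % n := by
      rw [Int.emod_eq_emod_iff_emod_sub_eq_zero]
      exact (PySem.Int.emod_eq_zero_iff_dvd _ _).2 hd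
    omega
  · intro hi
    have hd : n ∣ (L - i) := by
      apply (PySem.Int.emod_eq_zero_iff_dvd _ _).1
      rw [← Int.emod_eq_emod_iff_emod_sub_eq_zero]
      omega
    refine ⟨?_, hd⟩
    rcases lt_or_ge L n with h | h
    · rw [Int.emod_eq_of_lt hL0 h] at hi; omega
    · have := Int.emod_lt_of_pos L hn
      omega

lemma innerSum_append (vs : List Int) (x : Int) (n i : Int) (hn : 0 < n) (hi0 : 0 ≤ i) (hin : i < n) :
    innerSum (vs ++ [x]) n i =
      innerSum vs n i + (if i = PySem.Int.mod (vs.length : Int) n then x else 0) := by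
  have hL0 : (0 : Int) ≤ (vs.length : Int) := by positivity
  have hlen : (((vs ++ [x]).length : Nat) : Int) = (vs.length : Int) + 1 := by
    simp
  unfold innerSum
  rw [hlen, pyRange_succ_stop _ _ _ hn hi0, List.foldl_append]
  have hfirst :
      (PySem.List.pyRange i (vs.length : Int) n).foldl
          (fun acc j => acc + PySem.List.pyGetD (vs ++ [x]) j 0) 0
        = (PySem.List.pyRange i (vs.length : Int) n).foldl
          (fun acc j => acc + PySem.List.pyGetD vs j 0) 0 := by
    apply PySem.List.foldl_congr_mem
    intro acc j hj
    obtain ⟨hj1, hj2, _⟩ := (PySem.List.mem_pyRange_iff_of_pos hn j).1 hj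
    have hj0 : 0 ≤ j := le_trans hi0 hj1
    rw [PySem.List.pyGetD_eq_getElem _ _ hj0 (by rw [hlen]; omega),
      PySem.List.pyGetD_eq_getElem _ _ hj0 hj2,
      List.getElem_append_left (by omega)]
  rw [hfirst]
  simp only [hit_iff _ _ _ hn hi0 hin hL0]
  by_cases hc : i = PySem.Int.mod (vs.length : Int) n
  · rw [if_pos hc, if_pos hc]
    simp only [List.foldl_cons, List.foldl_nil]
    congr 1
    rw [PySem.List.pyGetD_eq_getElem _ _ hL0 (by rw [hlen]; omega)]
    exact List.getElem_concat_length (by omega) _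
  · rw [if_neg hc, if_neg hc]
    simp

-- A's outer loop is a map of innerSum over range(n).
lemma beggars_eq_map (values : List Int) (n : Int) :
    beggars values n = (PySem.List.pyRange 0 n 1).map (fun i => innerSum values n i) := by
  unfold beggars
  rw [show (fun (finList : List Int) (i : Int) =>
        let ind := PySem.List.pyRange i (values.length : Int) n
        let currSum := ind.foldl (fun acc j => acc + PySem.List.pyGetD values j 0) 0
        finList ++ [currSum])
      = (fun (finList : List Int) (i : Int) => finList ++ [innerSum values n i]) from rfl]
  rw [PySem.List.foldl_append_singleton_eq_map]
  simp

-- B's single modulo pass computes every bucket's strided sum at once.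
lemma bfold (n : Int) (hn : 0 < n) (vs : List Int) :
    (PySem.List.enumerate vs).foldl
        (fun r p => r.set (PySem.Int.mod p.1 n).toNat
          (r.getD (PySem.Int.mod p.1 n).toNat 0 + p.2)) (List.replicate n.toNat 0)
      = (PySem.List.pyRange 0 n 1).map (fun i => innerSum vs n i) := by
  induction vs using List.reverseRecOn with
  | nil =>
    simp only [PySem.List.enumerate_nil, List.foldl_nil]
    apply List.ext_getElem
    · simp [PySem.List.length_pyRange_one]
    · intro k hk hk'
      rw [List.getElem_replicate, List.getElem_map, PySem.List.getElem_pyRange_one]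
      rw [innerSum_nil n _ hn (by omega)]
  | append_singleton vs x ih =>
    rw [PySem.List.enumerate_append, List.foldl_append, ih]
    simp only [PySem.List.enumerate_cons, PySem.List.enumerate_nil, List.foldl_cons,
      List.foldl_nil, zero_add]
    have hm0 : 0 ≤ PySem.Int.mod (vs.length : Int) n := PySem.Int.mod_nonneg _ hn
    have hmlt : PySem.Int.mod (vs.length : Int) n < n := PySem.Int.mod_lt _ hn
    apply List.ext_getElem
    · simp [PySem.List.length_pyRange_one]
    · intro k hk hk'
      have hklen : k < (PySem.List.pyRange 0 n 1).length := by
        simpa [PySem.List.length_pyRange_one] using hk'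
      have hkn : (k : Int) < n := by
        rw [PySem.List.length_pyRange_one] at hklen; omega
      rw [List.getElem_set]
      conv_rhs => rw [List.getElem_map, PySem.List.getElem_pyRange_one _ _ _ hklen, zero_add]
      rw [innerSum_append vs x n _ hn (by omega) hkn]
      by_cases hc : (PySem.Int.mod (vs.length : Int) n).toNat = k
      · rw [if_pos hc, if_pos (by omega)]
        have hgd : (((PySem.List.pyRange 0 n 1).map (fun i => innerSum vs n i)).getD
            (PySem.Int.mod (vs.length : Int) n).toNat 0)
            = innerSum vs n (k : Int) := by
          rw [hc, List.getD_eq_getElem _ _ (by simpa [PySem.List.length_pyRange_one] using hklen),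
            List.getElem_map, PySem.List.getElem_pyRange_one _ _ _ hklen, zero_add]
        rw [hgd]
      · rw [if_neg hc, if_neg (by omega), add_zero,
          List.getElem_map, PySem.List.getElem_pyRange_one _ _ _ hklen, zero_add]

theorem beggars_spec : Claim_equal_beggars := by
  intro values n _
  unfold Spec_beggars
  rw [beggars_eq_map]
  simp only [beggars_alt]
  by_cases hn : 0 < n
  · rw [if_pos hn, bfold n hn values]
  · rw [if_neg hn, PySem.List.pyRange_one_eq_nil (by omega), List.map_nil,
      show n.toNat = 0 by omega, List.replicate_zero]
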